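-- pv_equiv track=rewrite | github.com/CrispyChillies/AIoT-AutoEye | backend/mqtt_handler.py | count_vehicles
-- ===== SOURCE A (Python) =====
-- def count_vehicles(bbox_data):
--     """Count vehicles by class and lane"""
--     counts = {
--         "cars_in": 0,
--         "cars_out": 0,
--         "motorbikes_in": 0,
--         "motorbikes_out": 0,
--         "total": len(bbox_data),
--         "cars_total": 0,
--         "motorbikes_total": 0,
--     }
--
--     for bbox in bbox_data:
--         class_id = bbox.get("class", -1)
--         lane = bbox.get("lane", "unknown")
--
--         if class_id == "car":  # Car
--             counts["cars_total"] += 1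
--             if lane == "in":
--                 counts["cars_in"] += 1
--             elif lane == "out":
--                 counts["cars_out"] += 1
--         elif class_id == "motorbike":  # Motorbike
--             counts["motorbikes_total"] += 1
--             if lane == "in":
--                 counts["motorbikes_in"] += 1
--             elif lane == "out":
--                 counts["motorbikes_out"] += 1
--
--     return counts
-- ===== SOURCE B (Python) =====
-- def count_vehicles(bbox_data):
--     """Count vehicles by class and lane"""
--     pairs = [(b.get("class"), b.get("lane")) for b in bbox_data]
--     return {
--         "cars_in": pairs.count(("car", "in")),
--         "cars_out": pairs.count(("car", "out")),
--         "motorbikes_in": pairs.count(("motorbike", "in")),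
--         "motorbikes_out": pairs.count(("motorbike", "out")),
--         "total": len(bbox_data),
--         "cars_total": sum(1 for c, _ in pairs if c == "car"),
--         "motorbikes_total": sum(1 for c, _ in pairs if c == "motorbike"),
--     }
-- ===== Notes on version B (the rewrite author's own statement) =====
-- stated objective: idiomatic
-- what changed: Replaces the per-item if/elif increment loop over a mutable counts dict with an index-then-assemble decomposition: map each bbox to its (class, lane) pair once, then build the result dict directly from pair counts and per-class tallies.
import Mathlib
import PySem

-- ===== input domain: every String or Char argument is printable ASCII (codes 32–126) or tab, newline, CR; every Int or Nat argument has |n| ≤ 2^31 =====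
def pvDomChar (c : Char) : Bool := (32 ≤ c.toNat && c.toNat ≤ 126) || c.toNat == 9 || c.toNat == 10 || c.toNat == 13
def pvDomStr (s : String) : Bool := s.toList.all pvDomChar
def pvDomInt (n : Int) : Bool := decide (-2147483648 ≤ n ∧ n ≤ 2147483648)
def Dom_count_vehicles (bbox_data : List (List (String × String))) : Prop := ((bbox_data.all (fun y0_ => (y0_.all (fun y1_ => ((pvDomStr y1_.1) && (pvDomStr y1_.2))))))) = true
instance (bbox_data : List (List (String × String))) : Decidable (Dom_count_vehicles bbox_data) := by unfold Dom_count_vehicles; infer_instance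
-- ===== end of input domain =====

-- B replaces A's per-item if/elif increments on a mutable dict by a map-to-(class,lane)-pairs pass
-- plus direct count lookups (idiomatic; same cost). Equivalence of return values is proved below.

-- ===== PORT A =====
-- one loop iteration of A: update the counts dict for one bbox
def pvStep (counts : PySem.Dict String Int) (bbox : List (String × String)) : PySem.Dict String Int :=
  let class_id := (PySem.Dict.mk bbox).get? "class"   -- bbox.get("class", -1): none plays the -1 default (never equal to a class name)
  let lane := ((PySem.Dict.mk bbox).get? "lane").getD "unknown"   -- bbox.get("lane", "unknown")
  if class_id = some "car" then
    let c1 := counts.modify "cars_total" 0 (· + 1)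
    if lane = "in" then c1.modify "cars_in" 0 (· + 1)
    else if lane = "out" then c1.modify "cars_out" 0 (· + 1)
    else c1
  else if class_id = some "motorbike" then
    let c1 := counts.modify "motorbikes_total" 0 (· + 1)
    if lane = "in" then c1.modify "motorbikes_in" 0 (· + 1)
    else if lane = "out" then c1.modify "motorbikes_out" 0 (· + 1)
    else c1
  else counts

def count_vehicles (bbox_data : List (List (String × String))) : List (String × Int) :=
  let counts : PySem.Dict String Int := PySem.Dict.mk
    [("cars_in", 0), ("cars_out", 0), ("motorbikes_in", 0), ("motorbikes_out", 0),
     ("total", (bbox_data.length : Int)), ("cars_total", 0), ("motorbikes_total", 0)]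
  (bbox_data.foldl pvStep counts).items

-- ===== PORT B =====
-- the (class, lane) pair B extracts from one bbox: (b.get("class"), b.get("lane"))
def pvPair (b : List (String × String)) : Option String × Option String :=
  ((PySem.Dict.mk b).get? "class", (PySem.Dict.mk b).get? "lane")

def count_vehicles_alt (bbox_data : List (List (String × String))) : List (String × Int) :=
  let pairs := bbox_data.map pvPair
  [("cars_in", (pairs.count (some "car", some "in") : Int)),
   ("cars_out", (pairs.count (some "car", some "out") : Int)),
   ("motorbikes_in", (pairs.count (some "motorbike", some "in") : Int)),
   ("motorbikes_out", (pairs.count (some "motorbike", some "out") : Int)),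
   ("total", (bbox_data.length : Int)),
   ("cars_total", (pairs.countP (fun p => p.1 == some "car") : Int)),
   ("motorbikes_total", (pairs.countP (fun p => p.1 == some "motorbike") : Int))]

-- ===== PRECONDITION & SPEC =====
def Spec_count_vehicles (bbox_data : List (List (String × String))) (out : List (String × Int)) : Prop := out = count_vehicles_alt bbox_data
instance (bbox_data : List (List (String × String))) (out : List (String × Int)) : Decidable (Spec_count_vehicles bbox_data out) := by unfold Spec_count_vehicles; infer_instance

-- ===== CLAIM (what is proved, stated in full; the proofs are below) =====
def Claim_equal_count_vehicles : Prop := ∀ (bbox_data : List (List (String × String))), Dom_count_vehicles bbox_data → Spec_count_vehicles bbox_data (count_vehicles bbox_data)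

-- ===== LEMMAS AND PROOFS =====

-- loop invariant: folding A's step over l on the 7-key counts dict adds B's tallies to each slot
theorem pvLoop (l : List (List (String × String))) (a b c d n f g : Int) :
    (l.foldl pvStep (PySem.Dict.mk
      [("cars_in", a), ("cars_out", b), ("motorbikes_in", c), ("motorbikes_out", d),
       ("total", n), ("cars_total", f), ("motorbikes_total", g)])).items
    = [("cars_in", a + ((l.map pvPair).count (some "car", some "in") : Int)),
       ("cars_out", b + ((l.map pvPair).count (some "car", some "out") : Int)),
       ("motorbikes_in", c + ((l.map pvPair).count (some "motorbike", some "in") : Int)),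
       ("motorbikes_out", d + ((l.map pvPair).count (some "motorbike", some "out") : Int)),
       ("total", n),
       ("cars_total", f + ((l.map pvPair).countP (fun p => p.1 == some "car") : Int)),
       ("motorbikes_total", g + ((l.map pvPair).countP (fun p => p.1 == some "motorbike") : Int))] := by
  induction l generalizing a b c d n f g with
  | nil => simp
  | cons x xs ih =>
    rw [List.foldl_cons]
    rcases hc : (PySem.Dict.mk x).get? "class" with _ | cs
    · simp only [pvStep, hc, reduceCtorEq, if_false]
      exact (ih a b c d n f g).trans (by
        simp [pvPair, hc])
    · rcases hl : (PySem.Dict.mk x).get? "lane" with _ | ls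
      all_goals simp only [pvStep, hc, hl, Option.getD_some, Option.getD_none, Option.some.injEq]
      all_goals by_cases hcar : cs = "car"
      all_goals by_cases hmoto : cs = "motorbike"
      all_goals try (exact absurd (hcar.symm.trans hmoto) (by decide))
      all_goals simp only [hcar, hmoto, if_true, if_false]
      -- lane = none cases: lane is "unknown"
      · exact (ih a b c d n (f + 1) g).trans (by
          simp [pvPair, hc, hl, hcar]; omega)
      · exact (ih a b c d n f (g + 1)).trans (by
          simp [pvPair, hc, hl, hmoto]; omega)
      · exact (ih a b c d n f g).trans (by
          simp [pvPair, hc, hl, hcar, hmoto])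
      -- lane = some ls cases
      · by_cases hin : ls = "in"
        · simp only [hin, if_true]
          exact (ih (a + 1) b c d n (f + 1) g).trans (by
            simp [pvPair, hc, hl, hcar, hin]; omega)
        · by_cases hout : ls = "out"
          · simp only [hout, if_true]
            exact (ih a (b + 1) c d n (f + 1) g).trans (by
              simp [pvPair, hc, hl, hcar, hout]; omega)
          · simp only [hin, hout, if_false]
            exact (ih a b c d n (f + 1) g).trans (by
              simp [pvPair, hc, hl, hcar, hin, hout]; omega)
      · by_cases hin : ls = "in"
        · simp only [hin, if_true]
          exact (ih a b (c + 1) d n f (g + 1)).trans (by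
            simp [pvPair, hc, hl, hmoto, hin]; omega)
        · by_cases hout : ls = "out"
          · simp only [hout, if_true]
            exact (ih a b c (d + 1) n f (g + 1)).trans (by
              simp [pvPair, hc, hl, hmoto, hout]; omega)
          · simp only [hin, hout, if_false]
            exact (ih a b c d n f (g + 1)).trans (by
              simp [pvPair, hc, hl, hmoto, hin, hout]; omega)
      · exact (ih a b c d n f g).trans (by
          simp [pvPair, hc, hl, hcar, hmoto])

-- ===== VERDICT (by name: the statement is the Claim_ definition above) =====
theorem count_vehicles_spec : Claim_equal_count_vehicles := by
  intro bbox_data _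
  show _ = _
  unfold count_vehicles count_vehicles_alt
  rw [pvLoop]
  simp
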